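-- pv_equiv track=rewrite | github.com/kittilsenstian-debug/the-hand | theory-tools/pariah_fibonacci_analysis.py | consecutive_fib_triples
-- ===== SOURCE A (Python) =====
-- def consecutive_fib_triples(max_val):
--     """Return all consecutive Fibonacci triples (a, b, c) with c <= max_val."""
--     fibs = []
--     a, b = 0, 1
--     while a <= max_val:
--         fibs.append(a)
--         a, b = b, a + b
--     triples = []
--     for i in range(len(fibs) - 2):
--         if fibs[i+2] <= max_val:
--             triples.append((fibs[i], fibs[i+1], fibs[i+2]))
--     return triples
-- ===== SOURCE B (Python) =====
-- def consecutive_fib_triples(max_val):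
--     """Return all consecutive Fibonacci triples (a, b, c) with c <= max_val."""
--     triples = []
--     a, b, c = 0, 1, 1
--     while c <= max_val:
--         triples.append((a, b, c))
--         a, b, c = b, c, b + c
--     return triples
-- ===== Notes on version B (the rewrite author's own statement) =====
-- stated objective: simpler
-- what changed: B generates the triples directly with a three-wide sliding window in one pass, dropping A's stored Fibonacci list and its indexed second pass.
import Mathlib
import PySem

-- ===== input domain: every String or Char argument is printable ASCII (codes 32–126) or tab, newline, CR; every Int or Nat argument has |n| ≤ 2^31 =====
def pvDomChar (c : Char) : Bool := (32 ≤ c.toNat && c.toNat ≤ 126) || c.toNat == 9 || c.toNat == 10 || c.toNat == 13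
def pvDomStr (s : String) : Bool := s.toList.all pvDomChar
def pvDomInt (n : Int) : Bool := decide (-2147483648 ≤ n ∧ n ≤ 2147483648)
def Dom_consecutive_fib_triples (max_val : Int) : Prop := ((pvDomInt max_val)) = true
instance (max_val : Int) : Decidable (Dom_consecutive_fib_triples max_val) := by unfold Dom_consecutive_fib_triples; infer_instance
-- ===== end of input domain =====

-- B replaces A's build-a-list-then-rescan-by-index with a single three-wide sliding-window pass (simpler decomposition, same cost).

-- ===== PORT A =====
-- the 'while a <= max_val' list-building loop; the proof arguments are invariants of A's
-- loop state (0 ≤ a ≤ b, 1 ≤ b) carried only to justify termination, not extra logic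
def fibBuild (M a b : Int) (ha : 0 ≤ a) (_hab : a ≤ b) (hb : 1 ≤ b) : List Int :=
  if h : a ≤ M then a :: fibBuild M b (a + b) (by omega) (by omega) (by omega) else []
termination_by ((M + 1 - a).toNat, (M + 1 - b).toNat)
decreasing_by
  refine Prod.lex_iff.mpr ?_
  omega

def consecutive_fib_triples (max_val : Int) : List (Int × Int × Int) :=
  let fibs := fibBuild max_val 0 1 (by omega) (by omega) (by omega)
  (PySem.List.pyRange 0 ((fibs.length : Int) - 2) 1).foldl
    (fun acc i =>
      if PySem.List.pyGetD fibs (i + 2) 0 ≤ max_val then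
        acc ++ [(PySem.List.pyGetD fibs i 0, PySem.List.pyGetD fibs (i + 1) 0,
                 PySem.List.pyGetD fibs (i + 2) 0)]
      else acc) []

-- ===== PORT B =====
-- the 'while c <= max_val' sliding-window loop; proof arguments are termination invariants only
def winLoop (M a b c : Int) (hb : 0 < b) (hc : 0 < c) : List (Int × Int × Int) :=
  if h : c ≤ M then (a, b, c) :: winLoop M b c (b + c) (by omega) (by omega) else []
termination_by (M + 1 - c).toNat
decreasing_by omega

def consecutive_fib_triples_alt (max_val : Int) : List (Int × Int × Int) :=
  winLoop max_val 0 1 1 (by omega) (by omega)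

-- ===== PRECONDITION & SPEC =====
def Spec_consecutive_fib_triples (max_val : Int) (out : List (Int × Int × Int)) : Prop := out = consecutive_fib_triples_alt max_val
instance (max_val : Int) (out : List (Int × Int × Int)) : Decidable (Spec_consecutive_fib_triples max_val out) := by unfold Spec_consecutive_fib_triples; infer_instance

-- ===== CLAIM (what is proved, stated in full; the proofs are below) =====
def Claim_equal_consecutive_fib_triples : Prop := ∀ (max_val : Int), Dom_consecutive_fib_triples max_val → Spec_consecutive_fib_triples max_val (consecutive_fib_triples max_val)

-- ===== LEMMAS AND PROOFS =====

-- the index-based second pass of A, rewritten as a structural window recursion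
def tripRec (M : Int) : List Int → List (Int × Int × Int)
  | x :: y :: z :: t => (if z ≤ M then [(x, y, z)] else []) ++ tripRec M (y :: z :: t)
  | _ => []

-- the Nat-indexed closed form of A's second pass
def tripIdx (M : Int) (xs : List Int) : List (Int × Int × Int) :=
  ((List.range (xs.length - 2)).filter (fun k => decide (xs.getD (k + 2) 0 ≤ M))).map
    (fun k => (xs.getD k 0, xs.getD (k + 1) 0, xs.getD (k + 2) 0))

theorem foldl_append_if_prop {α β : Type} (p : α → Prop) [DecidablePred p] (f : α → β)
    (l : List α) (acc : List β) :
    l.foldl (fun acc x => if p x then acc ++ [f x] else acc) acc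
      = acc ++ (l.filter (fun x => decide (p x))).map f := by
  induction l generalizing acc with
  | nil => simp
  | cons x t ih =>
    rw [List.foldl_cons, List.filter_cons]
    by_cases h : p x <;> simp [h, ih]

theorem foldA_eq_tripIdx (M : Int) (xs : List Int) :
    (PySem.List.pyRange 0 ((xs.length : Int) - 2) 1).foldl
      (fun acc i =>
        if PySem.List.pyGetD xs (i + 2) 0 ≤ M then
          acc ++ [(PySem.List.pyGetD xs i 0, PySem.List.pyGetD xs (i + 1) 0,
                   PySem.List.pyGetD xs (i + 2) 0)]
        else acc) []
    = tripIdx M xs := by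
  have hlen : (((xs.length : Int) - 2) - 0).toNat = xs.length - 2 := by omega
  rw [PySem.List.pyRange_one, hlen, List.foldl_map, foldl_append_if_prop]
  have e0 : ∀ (k : Nat), PySem.List.pyGetD xs ((0 : Int) + ↑k) 0 = xs.getD k 0 := by
    intro k
    have h : ((0 : Int) + ↑k) = ((k : Nat) : Int) := by omega
    rw [h, PySem.List.pyGetD_natCast]
  have e1 : ∀ (k : Nat), PySem.List.pyGetD xs ((0 : Int) + ↑k + 1) 0 = xs.getD (k + 1) 0 := by
    intro k
    have h : ((0 : Int) + ↑k + 1) = ((k + 1 : Nat) : Int) := by omega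
    rw [h, PySem.List.pyGetD_natCast]
  have e2 : ∀ (k : Nat), PySem.List.pyGetD xs ((0 : Int) + ↑k + 2) 0 = xs.getD (k + 2) 0 := by
    intro k
    have h : ((0 : Int) + ↑k + 2) = ((k + 2 : Nat) : Int) := by omega
    rw [h, PySem.List.pyGetD_natCast]
  simp only [e0, e1, e2]
  unfold tripIdx
  rw [List.nil_append]

theorem tripIdx_eq_tripRec (M : Int) (xs : List Int) : tripIdx M xs = tripRec M xs := by
  fun_induction tripRec M xs with
  | case1 x y z t ih =>
    rw [← ih]
    unfold tripIdx
    by_cases hz : z ≤ M <;>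
      simp [List.range_succ_eq_map, List.filter_map, List.map_map,
        Function.comp_def, Nat.succ_eq_add_one, hz, add_assoc,
        List.getElem?_cons_succ] <;> rfl
  | case2 xs h =>
    unfold tripIdx
    match xs, h with
    | [], _ => rfl
    | [x], _ => rfl
    | [x, y], _ => rfl
    | x :: y :: z :: t, h => exact absurd rfl (h x y z t)

theorem tripRec_fibBuild (M : Int) : ∀ (a b : Int) (ha : 0 ≤ a) (hab : a ≤ b) (hb : 1 ≤ b),
    tripRec M (fibBuild M a b ha hab hb) = winLoop M a b (a + b) (by omega) (by omega) := by
  intro a b ha hab hb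
  fun_induction fibBuild M a b ha hab hb with
  | case1 a b ha hab hb h ih =>
    by_cases h2 : b ≤ M
    · rw [fibBuild] at ih ⊢
      simp only [dif_pos h2] at ih ⊢
      by_cases h3 : a + b ≤ M
      · rw [fibBuild] at ih ⊢
        simp only [dif_pos h3] at ih ⊢
        rw [winLoop]
        simp only [dif_pos h3]
        simp only [tripRec, if_pos h3, List.singleton_append]
        exact congrArg (List.cons _) ih
      · rw [fibBuild] at ih ⊢
        simp only [dif_neg h3] at ih ⊢
        rw [winLoop]
        simp only [dif_neg h3]
        rfl
    · rw [fibBuild]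
      simp only [dif_neg h2]
      rw [winLoop]
      have hn : ¬ (a + b ≤ M) := by omega
      simp only [dif_neg hn]
      rfl
  | case2 a b ha hab hb h =>
    rw [winLoop]
    have hn : ¬ (a + b ≤ M) := by omega
    simp only [dif_neg hn]
    rfl

-- ===== VERDICT (by name: the statement is the Claim_ definition above) =====
theorem consecutive_fib_triples_spec : Claim_equal_consecutive_fib_triples := by
  intro max_val _
  unfold Spec_consecutive_fib_triples consecutive_fib_triples consecutive_fib_triples_alt
  rw [foldA_eq_tripIdx, tripIdx_eq_tripRec, tripRec_fibBuild]
  norm_num
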